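-- pv_equiv track=rewrite | github.com/DavePujan/clg-practicals | Sem 5/ADA Practicals/Practical 13/pr13.py | hr_simulation
-- ===== SOURCE A (Python) =====
-- def hr_simulation(employees, operations):
--     emp_dict = {}
--     for emp in employees:
--         emp_dict[emp] = "Active"
--     for op, emp in operations:
--         if op == 'remove' and emp in emp_dict:
--             emp_dict.pop(emp)
--     return emp_dict
-- ===== SOURCE B (Python) =====
-- def hr_simulation(employees, operations):
--     removed = {emp for op, emp in operations if op == 'remove'}
--     kept = [emp for emp in employees if emp not in removed]
--     return dict.fromkeys(kept, "Active")
-- ===== Notes on version B (the rewrite author's own statement) =====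
-- stated objective: simpler
-- what changed: Replaces A's dict-build followed by a destructive pop pass with a precomputed exclusion set, a filtered kept-list, and dict.fromkeys (order-preserving first-occurrence dedup) to construct the result directly, so no dict mutation or membership-driven deletion happens at all.
import Mathlib
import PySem

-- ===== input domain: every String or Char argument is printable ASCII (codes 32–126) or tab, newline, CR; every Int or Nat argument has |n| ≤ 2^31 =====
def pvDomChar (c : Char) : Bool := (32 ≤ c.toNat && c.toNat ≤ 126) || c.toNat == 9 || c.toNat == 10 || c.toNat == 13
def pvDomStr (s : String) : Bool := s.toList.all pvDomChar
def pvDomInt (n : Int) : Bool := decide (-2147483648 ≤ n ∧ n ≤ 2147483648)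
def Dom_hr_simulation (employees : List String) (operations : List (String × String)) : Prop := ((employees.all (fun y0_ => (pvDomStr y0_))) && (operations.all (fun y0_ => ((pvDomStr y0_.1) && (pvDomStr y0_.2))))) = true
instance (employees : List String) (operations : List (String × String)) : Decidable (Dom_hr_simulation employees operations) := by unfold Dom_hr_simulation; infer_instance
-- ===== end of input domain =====

-- B replaces A's dict-build + destructive pop pass with an exclusion set, a filtered kept-list and an order-preserving first-occurrence dedup (dict.fromkeys); objective: simpler.


-- ===== PORT A =====
-- A: build emp_dict by inserting every employee, then loop over operations popping
-- the target of each 'remove' op when present (pop of a present key = erase).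
def hr_simulation (employees : List String) (operations : List (String × String)) : List (String × String) :=
  (operations.foldl
    (fun d p => if p.1 == "remove" && d.contains p.2 then d.erase p.2 else d)
    (employees.foldl (fun d emp => d.insert emp "Active") (PySem.Dict.empty : PySem.Dict String String))).items

-- ===== PORT B =====
-- B: removed = {emp for op, emp in operations if op == 'remove'};
--    kept = [emp for emp in employees if emp not in removed];
--    return dict.fromkeys(kept, "Active").
-- dict.fromkeys is ported by hand as an order-preserving first-occurrence dedup of the
-- keys, each paired with "Active" — exact, since fromkeys keeps the first position of a
-- duplicate key and every value written is the same constant.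
def hr_simulation_alt (employees : List String) (operations : List (String × String)) : List (String × String) :=
  let removed := PySem.Set.ofList ((operations.filter (fun p => p.1 == "remove")).map (fun p => p.2))
  let kept := employees.filter (fun emp => !removed.contains emp)
  (kept.foldl (fun acc e => if acc.contains e then acc else acc ++ [e]) []).map (fun e => (e, "Active"))

-- ===== PRECONDITION & SPEC =====
def Spec_hr_simulation (employees : List String) (operations : List (String × String)) (out : List (String × String)) : Prop := out = hr_simulation_alt employees operations
instance (employees : List String) (operations : List (String × String)) (out : List (String × String)) : Decidable (Spec_hr_simulation employees operations out) := by unfold Spec_hr_simulation; infer_instance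

-- ===== CLAIM (what is proved, stated in full; the proofs are below) =====
def Claim_equal_hr_simulation : Prop := ∀ (employees : List String) (operations : List (String × String)), Dom_hr_simulation employees operations → Spec_hr_simulation employees operations (hr_simulation employees operations)

-- ===== LEMMAS AND PROOFS =====

-- A's remove loop = filtering out of the items every pair whose key is a 'remove' target.
lemma removeLoop_items (ops : List (String × String)) (d : PySem.Dict String String) :
    (ops.foldl (fun d p => if p.1 == "remove" && d.contains p.2 then d.erase p.2 else d) d).items
    = d.items.filter
        (fun q => !((ops.filter (fun p => p.1 == "remove")).map (fun p => p.2)).contains q.1) := by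
  induction ops generalizing d with
  | nil => simp
  | cons o ops ih =>
    by_cases ho : o.1 == "remove"
    · have hstep : (if o.1 == "remove" && d.contains o.2 then d.erase o.2 else d).items
          = d.items.filter (fun q => !(q.1 == o.2)) := by
        by_cases hc : d.contains o.2
        · simp [ho, hc, PySem.Dict.erase]
        · rw [if_neg (by simp [ho, hc])]
          symm
          rw [List.filter_eq_self]
          intro q hq
          simp only [Bool.not_eq_eq_eq_not, Bool.not_true]
          cases h : q.1 == o.2
          · rfl
          · exact absurd (show d.contains o.2 = true from List.any_eq_true.mpr ⟨q, hq, h⟩) hc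
      simp only [List.foldl_cons]
      rw [show ((if o.1 == "remove" && d.contains o.2 then d.erase o.2 else d))
            = PySem.Dict.mk (d.items.filter (fun q => !(q.1 == o.2))) from
          PySem.Dict.ext hstep]
      rw [ih]
      simp only [List.filter_cons, ho, if_pos, List.map_cons, List.filter_filter]
      apply List.filter_congr
      intro q _
      simp only [List.contains_cons, Bool.not_or]
      rw [Bool.and_comm]
      try congr 1
      try rw [beq_comm]
    · simp only [List.foldl_cons]
      rw [if_neg (by simp [ho]), ih, List.filter_cons_of_neg (by simpa using ho)]

-- A's build loop: the items of the dict built by inserting xs with the constant value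
-- "Active" are the first-occurrence dedup of xs, each key paired with "Active".
lemma build_items (xs : List String) (acc : List String) (d : PySem.Dict String String)
    (h : d.items = acc.map (fun e => (e, "Active"))) :
    (xs.foldl (fun d e => d.insert e "Active") d).items
    = (xs.foldl (fun a e => if a.contains e then a else a ++ [e]) acc).map (fun e => (e, "Active")) := by
  induction xs generalizing acc d with
  | nil => simpa using h
  | cons x xs ih =>
    have hcont : d.contains x = acc.contains x := by
      show d.items.any (fun p => p.1 == x) = _
      rw [h, List.any_map]
      exact List.any_beq'

    simp only [List.foldl_cons]
    by_cases hc : acc.contains x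
    · have hins : (d.insert x "Active").items = d.items := by
        rw [PySem.Dict.items_insert_of_contains _ _ (by rw [hcont]; exact hc)]
        apply List.map_congr_left ?_ |>.trans (List.map_id _)
        intro p hp
        rw [h] at hp
        obtain ⟨e, _, rfl⟩ := List.mem_map.mp hp
        by_cases hex : e = x <;> simp [hex]
      rw [if_pos hc]
      exact ih acc (d.insert x "Active") (hins.trans h)
    · rw [if_neg hc]
      refine ih (acc ++ [x]) (d.insert x "Active") ?_
      rw [PySem.Dict.items_insert_of_not_contains _ _ (by rw [hcont]; simpa using hc), h]
      simp
  
-- first-occurrence dedup commutes with filtering.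
lemma dedup_filter (q : String → Bool) (xs acc : List String) :
    ((xs.filter q).foldl (fun a e => if a.contains e then a else a ++ [e]) (acc.filter q))
    = (xs.foldl (fun a e => if a.contains e then a else a ++ [e]) acc).filter q := by
  induction xs generalizing acc with
  | nil => simp
  | cons x xs ih =>
    by_cases hq : q x
    · have hcont : (acc.filter q).contains x = acc.contains x := by
        cases hc : acc.contains x
        · simp only [List.contains_eq_mem] at hc ⊢
          simp only [decide_eq_false_iff_not] at hc ⊢
          exact fun hm => hc (List.mem_filter.mp hm).1
        · simp only [List.contains_eq_mem, decide_eq_true_eq] at hc ⊢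
          exact List.mem_filter.mpr ⟨hc, hq⟩
      rw [List.filter_cons_of_pos hq]
      simp only [List.foldl_cons, hcont]
      by_cases hc : acc.contains x
      · rw [if_pos hc, if_pos hc]; exact ih acc
      · rw [if_neg hc, if_neg hc]
        have : (acc ++ [x]).filter q = acc.filter q ++ [x] := by simp [List.filter_append, hq]
        rw [← this]; exact ih (acc ++ [x])
    · rw [List.filter_cons_of_neg hq]
      simp only [List.foldl_cons]
      by_cases hc : acc.contains x
      · rw [if_pos hc]; exact ih acc
      · rw [if_neg hc]
        have : (acc ++ [x]).filter q = acc.filter q := by simp [List.filter_append, hq]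
        rw [← this]; exact ih (acc ++ [x])

-- filtering pairs with constant second component = filtering the keys, then pairing.
lemma filter_map_pair (Q : String → Bool) (ks : List String) :
    (ks.map (fun e => (e, "Active"))).filter (fun p => Q p.1)
    = (ks.filter Q).map (fun e => (e, "Active")) := by
  induction ks with
  | nil => rfl
  | cons k ks ih =>
    by_cases hk : Q k <;>
      simp [hk, ih]

-- set membership test = raw-list membership test
lemma set_ofList_contains (R : List String) (e : String) :
    (PySem.Set.ofList R).contains e = R.contains e := by
  simp only [PySem.Set.contains]
  cases h : R.contains e
  · have : e ∉ R := by simpa using h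
    simpa using fun hm => this ((PySem.Set.mem_ofList R e).mp hm)
  · have : e ∈ R := by simpa using h
    simpa using (PySem.Set.mem_ofList R e).mpr this

-- ===== VERDICT (by name: the statement is the Claim_ definition above) =====
theorem hr_simulation_spec : Claim_equal_hr_simulation := by
  intro employees operations _
  unfold Spec_hr_simulation hr_simulation
  simp only [hr_simulation_alt]
  set R := (operations.filter (fun p => p.1 == "remove")).map (fun p => p.2) with hR
  have hB : employees.filter (fun emp => !(PySem.Set.ofList R).contains emp)
      = employees.filter (fun emp => !R.contains emp) := by
    apply List.filter_congr
    intro e _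
    rw [set_ofList_contains]
  rw [removeLoop_items, build_items employees [] PySem.Dict.empty rfl, ← hR,
      filter_map_pair (fun e => !R.contains e), hB,
      ← dedup_filter (fun e => !R.contains e) employees []]
  rfl
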